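-- pv_equiv track=rewrite | github.com/kkr010128/codebert | problem132/problem132_86.py | solve
-- ===== SOURCE A (Python) =====
-- from itertools import accumulate
--
-- def solve(n,k,a):
--     for _ in range(k):
--         if a==[n]*n:    return a
--         t = [0]*(n+1)
--         for i,x in enumerate(a):
--             t[max(0,i-x)] += 1
--             t[min(n,i+x+1)] -=1
--         a = list(accumulate(t))[:-1]
--     return a
-- ===== SOURCE B (Python) =====
-- def solve(n, k, a):
--     # Same outer loop and early exit as A, but each round recomputes every
--     # position directly by counting the lamps that cover it (no difference
--     # array / prefix sums).
--     for _ in range(k):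
--         if a == [n] * n:
--             return a
--         a = [sum(1 for j, x in enumerate(a)
--                  if max(0, j - x) <= p < min(n, j + x + 1))
--              for p in range(n)]
--     return a
-- ===== Notes on version B (the rewrite author's own statement) =====
-- stated objective: simpler
-- what changed: Each diffusion round builds the new array by directly counting, for every position, the lamps whose interval covers it, instead of maintaining a +1/-1 difference array and taking prefix sums with accumulate.
-- outside the precondition, e.g. on solve(2, 1, [0, -1]): A returns [1, -1], B returns [1, 0]
import Mathlib
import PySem

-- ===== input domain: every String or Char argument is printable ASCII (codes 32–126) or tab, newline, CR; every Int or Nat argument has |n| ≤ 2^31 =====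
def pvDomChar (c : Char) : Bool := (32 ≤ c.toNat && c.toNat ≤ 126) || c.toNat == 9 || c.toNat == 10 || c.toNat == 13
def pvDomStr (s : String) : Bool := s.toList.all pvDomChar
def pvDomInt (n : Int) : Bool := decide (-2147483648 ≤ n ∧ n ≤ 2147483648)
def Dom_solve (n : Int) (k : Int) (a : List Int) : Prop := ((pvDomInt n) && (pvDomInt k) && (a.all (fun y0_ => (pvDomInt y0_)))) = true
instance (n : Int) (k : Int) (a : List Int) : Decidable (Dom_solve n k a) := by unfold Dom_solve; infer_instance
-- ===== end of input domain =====

-- B recomputes each round by directly counting covering lamps per position instead of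
-- a +1/-1 difference array with prefix sums (objective: simpler; return value only).

-- ===== PORT A =====
-- t[i] += d at a Nat index; no-op past the end
def addAt : List Int → Nat → Int → List Int
  | [], _, _ => []
  | v :: t, 0, d => (v + d) :: t
  | v :: t, i + 1, d => v :: addAt t i d

-- Python t[i] += d with negative-index wraparound; no-op where Python would raise
-- (such inputs lie outside Pre_solve)
def addAtI (t : List Int) (i : Int) (d : Int) : List Int :=
  addAt t (if i < 0 then (i + t.length).toNat else i.toNat) d

-- itertools.accumulate: running prefix sums
def pyAccumulate : List Int → Int → List Int
  | [], _ => []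
  | x :: xs, s => (s + x) :: pyAccumulate xs (s + x)

-- one round of A's loop body: difference array then accumulate, dropping the last cell ([:-1])
def roundA (n : Int) (a : List Int) : List Int :=
  let t := (PySem.List.enumerate a 0).foldl
    (fun t ix =>
      addAtI (addAtI t (max 0 (ix.1 - ix.2)) 1) (min n (ix.1 + ix.2 + 1)) (-1))
    (List.replicate (n + 1).toNat 0)
  (pyAccumulate t 0).dropLast

def solveLoopA (n : Int) : Nat → List Int → List Int
  | 0, a => a
  | f + 1, a =>
    if a = List.replicate n.toNat n then a
    else solveLoopA n f (roundA n a)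

def solve (n : Int) (k : Int) (a : List Int) : List Int := solveLoopA n k.toNat a

-- ===== PORT B =====
-- one round of B: for each position p, count the lamps whose interval covers p
def roundB (n : Int) (a : List Int) : List Int :=
  (PySem.List.pyRange 0 n 1).map (fun p =>
    (PySem.List.enumerate a 0).foldl
      (fun s jx => if max 0 (jx.1 - jx.2) ≤ p ∧ p < min n (jx.1 + jx.2 + 1) then s + 1 else s) 0)

def solveLoopB (n : Int) : Nat → List Int → List Int
  | 0, a => a
  | f + 1, a =>
    if a = List.replicate n.toNat n then a
    else solveLoopB n f (roundB n a)

def solve_alt (n : Int) (k : Int) (a : List Int) : List Int := solveLoopB n k.toNat a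

-- ===== PRECONDITION & SPEC =====
-- For k ≥ 1, Pre_solve excludes inputs with a negative brightness or a lamp index exceeding
-- n plus its brightness (and n < 0 with a nonempty list): there A either raises IndexError
-- or returns values produced by accidental negative-index wraparound in the difference array.
def Pre_solve (n : Int) (k : Int) (a : List Int) : Prop :=
  k ≤ 0 ∨ ((0 ≤ n ∨ a = []) ∧ (∀ x ∈ a, 0 ≤ x) ∧
    (∀ jx ∈ PySem.List.enumerate a 0, jx.1 - jx.2 ≤ n))
instance (n : Int) (k : Int) (a : List Int) : Decidable (Pre_solve n k a) := by
  unfold Pre_solve; infer_instance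

def pvWitness_solve : Int × Int × List Int := (3, 2, [1, 0, 2])

def Spec_solve (n : Int) (k : Int) (a : List Int) (out : List Int) : Prop := out = solve_alt n k a
instance (n : Int) (k : Int) (a : List Int) (out : List Int) : Decidable (Spec_solve n k a out) := by
  unfold Spec_solve; infer_instance

-- ===== CLAIM (what is proved, stated in full; the proofs are below) =====
def Claim_equal_solve : Prop :=
  ∀ (n : Int) (k : Int) (a : List Int), Dom_solve n k a → Pre_solve n k a →
    Spec_solve n k a (solve n k a)

-- ===== LEMMAS AND PROOFS =====

theorem length_addAt (t : List Int) (i : Nat) (d : Int) : (addAt t i d).length = t.length := by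
  induction t generalizing i with
  | nil => rfl
  | cons v t ih => cases i with
    | zero => rfl
    | succ j => simpa [addAt] using ih j

theorem length_addAtI (t : List Int) (i : Int) (d : Int) : (addAtI t i d).length = t.length := by
  unfold addAtI; rw [length_addAt]

theorem addAtI_of_nonneg (t : List Int) (i : Int) (d : Int) (h : 0 ≤ i) :
    addAtI t i d = addAt t i.toNat d := by
  unfold addAtI; rw [if_neg (by omega)]

theorem take_sum_addAt (t : List Int) (i : Nat) (d : Int) (σ : Nat) (h : i < t.length) :
    ((addAt t i d).take σ).sum = (t.take σ).sum + (if i < σ then d else 0) := by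
  induction t generalizing i σ with
  | nil => simp at h
  | cons v t ih =>
    cases i with
    | zero =>
      cases σ with
      | zero => simp [addAt]
      | succ σ => simp [addAt]; ring
    | succ j =>
      cases σ with
      | zero => simp [addAt]
      | succ σ =>
        have := ih j σ (by simpa using h)
        simp [addAt, this]
        split <;> ring

theorem length_pyAccumulate (t : List Int) (s : Int) : (pyAccumulate t s).length = t.length := by
  induction t generalizing s with
  | nil => rfl
  | cons x xs ih => simpa [pyAccumulate] using ih (s + x)

theorem getElem_pyAccumulate (t : List Int) (s : Int) (p : Nat) (h : p < t.length) :
    (pyAccumulate t s)[p]'(by rw [length_pyAccumulate]; exact h) = s + (t.take (p + 1)).sum := by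
  induction t generalizing s p with
  | nil => simp at h
  | cons x xs ih =>
    cases p with
    | zero => simp [pyAccumulate]
    | succ q =>
      have := ih (s + x) q (by simpa using h)
      simp [pyAccumulate, this]; ring

theorem mem_enum (a : List Int) (s : Int) (jx : Int × Int) (h : jx ∈ PySem.List.enumerate a s) :
    s ≤ jx.1 ∧ jx.1 < s + a.length ∧ jx.2 ∈ a := by
  induction a generalizing s with
  | nil => simp [PySem.List.enumerate_nil] at h
  | cons x xs ih =>
    rw [PySem.List.enumerate_cons, List.mem_cons] at h
    rcases h with h | h
    · subst h; simp
    · have := ih (s + 1) h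
      refine ⟨by omega, ?_, List.mem_cons_of_mem _ this.2.2⟩
      have hl : ((x :: xs).length : Int) = (xs.length : Int) + 1 := by simp
      omega

-- fold lemma: prefix-sum of the difference array after processing all lamps
theorem fold_take_sum (n : Int) (a : List Int) (s : Int) (t : List Int) (σ : Nat)
    (ht : t.length = (n + 1).toNat)
    (hidx : ∀ jx ∈ PySem.List.enumerate a s,
      (max 0 (jx.1 - jx.2)).toNat < (n + 1).toNat ∧ (min n (jx.1 + jx.2 + 1)).toNat < (n + 1).toNat
        ∧ 0 ≤ min n (jx.1 + jx.2 + 1)) :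
    (((PySem.List.enumerate a s).foldl
      (fun t ix =>
        addAtI (addAtI t (max 0 (ix.1 - ix.2)) 1) (min n (ix.1 + ix.2 + 1)) (-1)) t).take σ).sum
    = (t.take σ).sum + ((PySem.List.enumerate a s).map
        (fun jx => (if (max 0 (jx.1 - jx.2)).toNat < σ then (1:Int) else 0)
          + (if (min n (jx.1 + jx.2 + 1)).toNat < σ then (-1:Int) else 0))).sum := by
  induction a generalizing s t with
  | nil => simp [PySem.List.enumerate_nil]
  | cons x xs ih =>
    rw [PySem.List.enumerate_cons] at hidx ⊢
    have h0 := hidx (s, x) (List.mem_cons_self ..)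
    have h1 : (max 0 (s - x)).toNat < t.length := by rw [ht]; exact h0.1
    have h2 : (min n (s + x + 1)).toNat < (addAt t (max 0 (s - x)).toNat 1).length := by
      rw [length_addAt, ht]; exact h0.2.1
    simp only [List.foldl_cons, List.map_cons, List.sum_cons]
    rw [addAtI_of_nonneg _ (min n ((s, x).1 + (s, x).2 + 1)) (-1) h0.2.2]
    rw [addAtI_of_nonneg t (max 0 ((s, x).1 - (s, x).2)) 1 (by omega)]
    rw [ih (s + 1) _ (by rw [length_addAt, length_addAt]; exact ht)
      (fun jx hjx => hidx jx (List.mem_cons_of_mem _ hjx))]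
    rw [take_sum_addAt (addAt t (max 0 (s - x)).toNat 1) (min n (s + x + 1)).toNat (-1) σ h2]
    rw [take_sum_addAt t (max 0 (s - x)).toNat 1 σ h1]
    ring

-- counting fold = sum of 0/1 indicator terms
theorem foldl_count (L : List (Int × Int)) (c : Int × Int → Prop) [DecidablePred c] (s0 : Int) :
    L.foldl (fun s jx => if c jx then s + 1 else s) s0
      = s0 + (L.map (fun jx => if c jx then (1:Int) else 0)).sum := by
  induction L generalizing s0 with
  | nil => simp
  | cons y L ih =>
    simp only [List.foldl_cons, List.map_cons, List.sum_cons]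
    rw [ih]
    split <;> ring

theorem length_roundA (n : Int) (a : List Int) (hn : 0 ≤ n) :
    (roundA n a).length = n.toNat := by
  unfold roundA
  have hfl : ∀ (L : List (Int × Int)) (t : List Int),
      ((L.foldl (fun t ix =>
        addAtI (addAtI t (max 0 (ix.1 - ix.2)) 1) (min n (ix.1 + ix.2 + 1)) (-1)) t)).length
      = t.length := by
    intro L
    induction L with
    | nil => intro t; rfl
    | cons y L ih => intro t; rw [List.foldl_cons, ih, length_addAtI, length_addAtI]
  simp only [List.length_dropLast, length_pyAccumulate, hfl, List.length_replicate]
  omega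

theorem enum_hidx (n : Int) (a : List Int) (hn : 0 ≤ n) (hx : ∀ x ∈ a, 0 ≤ x)
    (hr : ∀ jx ∈ PySem.List.enumerate a 0, jx.1 - jx.2 ≤ n) :
    ∀ jx ∈ PySem.List.enumerate a 0,
      (max 0 (jx.1 - jx.2)).toNat < (n + 1).toNat ∧ (min n (jx.1 + jx.2 + 1)).toNat < (n + 1).toNat
        ∧ 0 ≤ min n (jx.1 + jx.2 + 1) := by
  intro jx hjx
  have h1 := mem_enum a 0 jx hjx
  have h2 := hx jx.2 h1.2.2
  have h3 := hr jx hjx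
  omega

theorem length_roundB (n : Int) (a : List Int) : (roundB n a).length = n.toNat := by
  simp [roundB, PySem.List.length_pyRange_one]

theorem roundAB_eq (n : Int) (a : List Int) (hn : 0 ≤ n) (hx : ∀ x ∈ a, 0 ≤ x)
    (hr : ∀ jx ∈ PySem.List.enumerate a 0, jx.1 - jx.2 ≤ n) :
    roundA n a = roundB n a := by
  apply List.ext_getElem
  · rw [length_roundA n a hn, length_roundB]
  intro p hp hp'
  rw [length_roundA n a hn] at hp
  -- left side
  unfold roundA
  have hfl : ∀ (L : List (Int × Int)) (t : List Int),
      ((L.foldl (fun t ix =>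
        addAtI (addAtI t (max 0 (ix.1 - ix.2)) 1) (min n (ix.1 + ix.2 + 1)) (-1)) t)).length
      = t.length := by
    intro L
    induction L with
    | nil => intro t; rfl
    | cons y L ih => intro t; rw [List.foldl_cons, ih, length_addAtI, length_addAtI]
  have hlen : ((PySem.List.enumerate a 0).foldl
      (fun t ix =>
        addAtI (addAtI t (max 0 (ix.1 - ix.2)) 1) (min n (ix.1 + ix.2 + 1)) (-1))
      (List.replicate (n + 1).toNat 0)).length = (n + 1).toNat := by
    rw [hfl]; simp
  have hpl : p < ((pyAccumulate ((PySem.List.enumerate a 0).foldl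
      (fun t ix =>
        addAtI (addAtI t (max 0 (ix.1 - ix.2)) 1) (min n (ix.1 + ix.2 + 1)) (-1))
      (List.replicate (n + 1).toNat 0)) 0)).length - 1 := by
    rw [length_pyAccumulate, hlen]; omega
  rw [List.getElem_dropLast]
  rw [getElem_pyAccumulate _ 0 p (by rw [hlen]; omega)]
  rw [fold_take_sum n a 0 _ (p + 1) (by simp)
      (fun jx hjx => enum_hidx n a hn hx hr jx hjx)]
  rw [List.take_replicate]
  -- right side
  unfold roundB
  rw [List.getElem_map, PySem.List.getElem_pyRange_one]
  rw [foldl_count (PySem.List.enumerate a 0)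
      (fun jx => max 0 (jx.1 - jx.2) ≤ 0 + (p : Int) ∧ 0 + (p : Int) < min n (jx.1 + jx.2 + 1)) 0]
  simp only [List.sum_replicate, smul_zero, zero_add]
  apply congrArg
  apply List.map_congr_left
  intro jx hjx
  have h1 := mem_enum a 0 jx hjx
  have h2 := hx jx.2 h1.2.2
  have h3 := hr jx hjx
  have hpn : (p : Int) < n := by omega
  split_ifs <;> omega

theorem roundB_nonneg (n : Int) (a : List Int) : ∀ x ∈ roundB n a, 0 ≤ x := by
  intro x hxm
  unfold roundB at hxm
  obtain ⟨p, hp, rfl⟩ := List.mem_map.mp hxm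
  rw [foldl_count (PySem.List.enumerate a 0)
      (fun jx => max 0 (jx.1 - jx.2) ≤ p ∧ p < min n (jx.1 + jx.2 + 1)) 0]
  have : 0 ≤ (List.map (fun jx => if max 0 (jx.1 - jx.2) ≤ p ∧ p < min n (jx.1 + jx.2 + 1)
      then (1:Int) else 0) (PySem.List.enumerate a 0)).sum := by
    apply List.sum_nonneg
    intro y hy
    obtain ⟨jx, _, rfl⟩ := List.mem_map.mp hy
    split <;> omega
  omega

theorem loopAB_eq (n : Int) (f : Nat) (a : List Int) (hn : 0 ≤ n) (hx : ∀ x ∈ a, 0 ≤ x)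
    (hr : ∀ jx ∈ PySem.List.enumerate a 0, jx.1 - jx.2 ≤ n) :
    solveLoopA n f a = solveLoopB n f a := by
  induction f generalizing a with
  | zero => rfl
  | succ f ih =>
    rw [solveLoopA, solveLoopB]
    split
    · rfl
    · rw [roundAB_eq n a hn hx hr]
      apply ih
      · exact roundB_nonneg n a
      · intro jx hjx
        have h1 := mem_enum (roundB n a) 0 jx hjx
        have h2 := roundB_nonneg n a jx.2 h1.2.2
        have hlen : ((roundB n a).length : Int) = n.toNat := by rw [length_roundB]
        omega

theorem loop_nil_of_neg (n : Int) (f : Nat) (hn : n < 0) :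
    solveLoopA n f [] = solveLoopB n f [] := by
  cases f with
  | zero => rfl
  | succ f =>
    rw [solveLoopA, solveLoopB]
    have : ([] : List Int) = List.replicate n.toNat n := by
      rw [Int.toNat_of_nonpos (by omega)]; rfl
    rw [if_pos this, if_pos this]

-- ===== VERDICT (by name: the statement is the Claim_ definition above) =====
theorem solve_spec : Claim_equal_solve := by
  intro n k a _ hpre
  unfold Spec_solve solve solve_alt
  rcases hpre with hk | ⟨hna, hx, hr⟩
  · rw [Int.toNat_of_nonpos hk]; rfl
  · by_cases hn : 0 ≤ n
    · exact loopAB_eq n k.toNat a hn hx hr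
    · rcases hna with hna | rfl
      · omega
      · exact loop_nil_of_neg n k.toNat (by omega)
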